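-- pv_equiv track=rewrite | github.com/Chukwunazaekpere/msc-cryptology | optimizations/DES/sub_key_gen.py | _join_shifted_perm_keys
-- ===== SOURCE A (Python) =====
-- def _join_shifted_perm_keys(shifted_keys: dict):
--     shifted_keys_values = shifted_keys.values()
--     joint_keys = ""
--     joint_keys_list = []
--     for idx, splitted_key in enumerate(shifted_keys_values):
--         if idx == 0:
--             joint_keys+=(splitted_key)
--         else:
--             if idx%2 == 0:
--                 joint_keys+=(splitted_key)
--             else:
--                 joint_keys+=(splitted_key)
--                 joint_keys_list.append(joint_keys)
--                 joint_keys = ""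
--     return joint_keys_list
-- ===== SOURCE B (Python) =====
-- def _join_shifted_perm_keys(shifted_keys: dict):
--     vals = list(shifted_keys.values())
--     return [vals[i] + vals[i + 1] for i in range(0, len(vals) - 1, 2)]
-- ===== Notes on version B (the rewrite author's own statement) =====
-- stated objective: simpler
-- what changed: Replaces the element-by-element fold with a mutable string accumulator and parity branching by a single stride-2 index comprehension that emits one concatenated pair per step (the trailing unpaired value is dropped by the len-1 bound, matching A).
import Mathlib
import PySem

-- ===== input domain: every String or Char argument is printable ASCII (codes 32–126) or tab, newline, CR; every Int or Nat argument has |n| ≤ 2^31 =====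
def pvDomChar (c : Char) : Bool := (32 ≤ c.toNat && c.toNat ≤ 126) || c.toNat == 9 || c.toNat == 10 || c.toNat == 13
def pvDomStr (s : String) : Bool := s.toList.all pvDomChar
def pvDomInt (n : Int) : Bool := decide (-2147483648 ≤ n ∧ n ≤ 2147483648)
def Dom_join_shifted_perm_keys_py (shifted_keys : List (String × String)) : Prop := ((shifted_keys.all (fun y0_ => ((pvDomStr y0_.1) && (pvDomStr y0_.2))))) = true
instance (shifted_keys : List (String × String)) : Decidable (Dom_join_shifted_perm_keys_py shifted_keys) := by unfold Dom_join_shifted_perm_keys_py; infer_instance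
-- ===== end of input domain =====

-- B replaces A's element-wise fold with a mutable accumulator and parity branches
-- by a stride-2 index comprehension emitting one concatenated pair per step (simpler).


-- ===== PORT A =====
-- one step of A's for-loop over enumerate(shifted_keys.values()); state = (joint_keys, joint_keys_list)
def pvStepA (st : String × List String) (p : Int × String) : String × List String :=
  if p.1 = 0 then (st.1 ++ p.2, st.2)
  else if PySem.Int.mod p.1 2 = 0 then (st.1 ++ p.2, st.2)
  else ("", st.2 ++ [st.1 ++ p.2])

def join_shifted_perm_keys_py (shifted_keys : List (String × String)) : List String :=
  let shifted_keys_values := (PySem.Dict.ofList shifted_keys).values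
  let st := (PySem.List.enumerate shifted_keys_values).foldl pvStepA ("", [])
  st.2

-- ===== PORT B =====
def join_shifted_perm_keys_py_alt (shifted_keys : List (String × String)) : List String :=
  let vals := (PySem.Dict.ofList shifted_keys).values
  (PySem.List.pyRange 0 ((vals.length : Int) - 1) 2).map
    (fun i => PySem.List.pyGetD vals i "" ++ PySem.List.pyGetD vals (i + 1) "")

-- ===== PRECONDITION & SPEC =====
def Spec_join_shifted_perm_keys_py (shifted_keys : List (String × String)) (out : List String) : Prop := out = join_shifted_perm_keys_py_alt shifted_keys
instance (shifted_keys : List (String × String)) (out : List String) : Decidable (Spec_join_shifted_perm_keys_py shifted_keys out) := by unfold Spec_join_shifted_perm_keys_py; infer_instance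

-- ===== CLAIM (what is proved, stated in full; the proofs are below) =====
def Claim_equal_join_shifted_perm_keys_py : Prop := ∀ (shifted_keys : List (String × String)), Dom_join_shifted_perm_keys_py shifted_keys → Spec_join_shifted_perm_keys_py shifted_keys (join_shifted_perm_keys_py shifted_keys)

-- ===== LEMMAS AND PROOFS =====

-- the common value of both loops, with A's pending accumulator j for the first pair:
-- concatenate the values pairwise, drop a trailing odd element
def pvPairsFrom (j : String) (l : List String) : List String :=
  match l with
  | [] => []
  | [_] => []
  | x :: y :: t => (j ++ x ++ y) :: pvPairsFrom "" t

lemma twoStepInd {α : Type} {motive : List α → Prop} (h0 : motive []) (h1 : ∀ x, motive [x])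
    (h2 : ∀ x y t, motive t → motive (x :: y :: t)) : ∀ l, motive l
  | [] => h0
  | [x] => h1 x
  | x :: y :: t => h2 x y t (twoStepInd h0 h1 h2 t)

lemma pvStepA_even (st : String × List String) (m : Nat) (x : String) :
    pvStepA st (((2 * m : Nat) : Int), x) = (st.1 ++ x, st.2) := by
  unfold pvStepA
  rcases Nat.eq_zero_or_pos m with h | h
  · subst h; simp
  · have h2 : PySem.Int.mod ((2 * m : Nat) : Int) 2 = 0 :=
      (PySem.Int.mod_eq_zero_iff_dvd _ 2).mpr ⟨(m : Int), by push_cast; ring⟩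
    rw [if_neg (by omega), if_pos h2]

lemma pvStepA_odd (st : String × List String) (m : Nat) (x : String) :
    pvStepA st (((2 * m + 1 : Nat) : Int), x) = ("", st.2 ++ [st.1 ++ x]) := by
  unfold pvStepA
  have h2 : PySem.Int.mod ((2 * m + 1 : Nat) : Int) 2 ≠ 0 := by
    rw [Ne, PySem.Int.mod_eq_zero_iff_dvd]
    rintro ⟨c, hc⟩; omega
  rw [if_neg (by omega), if_neg h2]

lemma loopA (l : List String) : ∀ (m : Nat) (j : String) (acc : List String),
    ((PySem.List.enumerate l ((2 * m : Nat) : Int)).foldl pvStepA (j, acc)).2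
      = acc ++ pvPairsFrom j l := by
  induction l using twoStepInd with
  | h0 => intro m j acc; simp [PySem.List.enumerate_nil, pvPairsFrom]
  | h1 x =>
    intro m j acc
    rw [PySem.List.enumerate_cons, PySem.List.enumerate_nil]
    simp only [List.foldl_cons, List.foldl_nil, pvStepA_even]
    simp [pvPairsFrom]
  | h2 x y t ih =>
    intro m j acc
    rw [PySem.List.enumerate_cons, PySem.List.enumerate_cons]
    simp only [List.foldl_cons, pvStepA_even]
    have hc1 : ((2 * m : Nat) : Int) + 1 = ((2 * m + 1 : Nat) : Int) := by push_cast; ring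
    rw [hc1, pvStepA_odd]
    have hc2 : ((2 * m + 1 : Nat) : Int) + 1 = ((2 * (m + 1) : Nat) : Int) := by push_cast; ring
    rw [hc2, ih (m + 1)]
    simp [pvPairsFrom]

-- A's loop result is the pairwise concatenation of the value list
lemma portA_eq_pairs (l : List String) :
    ((PySem.List.enumerate l).foldl pvStepA ("", [])).2 = pvPairsFrom "" l := by
  have h := loopA l 0 "" []
  simpa using h

-- B's stride-2 Int range, rewritten as a Nat range of pair indices
lemma rangeB (l : List String) :
    PySem.List.pyRange 0 ((l.length : Int) - 1) 2
      = (List.range (l.length / 2)).map (fun k => ((2 * k : Nat) : Int)) := by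
  rw [PySem.List.pyRange_of_pos 0 ((l.length : Int) - 1) (by norm_num)]
  have hq : (if (0 : Int) < (l.length : Int) - 1 then (((l.length : Int) - 1 - 0 + 2 - 1) / 2).toNat else 0)
      = l.length / 2 := by
    split_ifs with h
    · omega
    · omega
  rw [hq]
  apply List.map_congr_left
  intro k _
  push_cast; ring

-- the Nat-range form of B's comprehension computes pvPairsFrom ""
lemma natB (l : List String) :
    (List.range (l.length / 2)).map (fun k => l.getD (2 * k) "" ++ l.getD (2 * k + 1) "")
      = pvPairsFrom "" l := by
  induction l using twoStepInd with
  | h0 => simp [pvPairsFrom]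
  | h1 x => simp [pvPairsFrom]
  | h2 x y t ih =>
    have hlen : (x :: y :: t).length / 2 = t.length / 2 + 1 := by simp; omega
    rw [hlen, List.range_succ_eq_map, List.map_cons, List.map_map]
    have hstep : ∀ k ∈ List.range (t.length / 2),
        ((fun k => (x :: y :: t).getD (2 * k) "" ++ (x :: y :: t).getD (2 * k + 1) "") ∘
          (fun n => n + 1)) k
        = (fun k => t.getD (2 * k) "" ++ t.getD (2 * k + 1) "") k := by
      intro k _
      simp only [Function.comp_apply]
      rw [show 2 * (k + 1) = 2 * k + 1 + 1 by ring]
      rw [List.getD_cons_succ, List.getD_cons_succ, List.getD_cons_succ, List.getD_cons_succ]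
    rw [List.map_congr_left hstep, ih]
    simp [pvPairsFrom]

lemma portB_eq_pairs (l : List String) :
    (PySem.List.pyRange 0 ((l.length : Int) - 1) 2).map
      (fun i => PySem.List.pyGetD l i "" ++ PySem.List.pyGetD l (i + 1) "") = pvPairsFrom "" l := by
  rw [rangeB, List.map_map]
  rw [← natB]
  apply List.map_congr_left
  intro k _
  simp only [Function.comp_apply]
  have hc : ((2 * k : Nat) : Int) + 1 = ((2 * k + 1 : Nat) : Int) := by push_cast; ring
  rw [hc, PySem.List.pyGetD_natCast, PySem.List.pyGetD_natCast]

-- ===== VERDICT (by name: the statement is the Claim_ definition above) =====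
theorem join_shifted_perm_keys_py_spec : Claim_equal_join_shifted_perm_keys_py := by
  intro shifted_keys _
  unfold Spec_join_shifted_perm_keys_py join_shifted_perm_keys_py join_shifted_perm_keys_py_alt
  rw [portA_eq_pairs, portB_eq_pairs]
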